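-- pv_equiv track=rewrite | github.com/Stepan-af/School | schoolege/19/3.py | f
-- ===== SOURCE A (Python) =====
-- def f(x, h):
--     if h == 3 and x >= 82:
--         return 1
--     elif h == 3 and x < 82:
--         return 0
--     elif h < 3 and x >= 82:
--         return 0
--     else:
--         if h % 2 == 0:
--             return f(x + 2, h + 1) or f(x + 4, h + 1) or f(x * 3, h + 1)
--         else:
--             return f(x + 2, h + 1) or f(x + 4, h + 1) or f(x * 3, h + 1)
-- ===== SOURCE B (Python) =====
-- def f(x, h):
--     stack = [(x, h)]
--     found = False
--     while stack and not found:
--         x1, h1 = stack.pop()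
--         if h1 == 3:
--             if x1 >= 82:
--                 found = True
--         elif x1 >= 82:
--             pass
--         else:
--             stack.append((x1 * 3, h1 + 1))
--             stack.append((x1 + 4, h1 + 1))
--             stack.append((x1 + 2, h1 + 1))
--     return 1 if found else 0
-- ===== Notes on version B (the rewrite author's own statement) =====
-- stated objective: alternative
-- what changed: Replaced the triple recursion chained with short-circuiting `or` by an iterative depth-first search over an explicit stack of (x, h) states with a found flag.
import Mathlib
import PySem

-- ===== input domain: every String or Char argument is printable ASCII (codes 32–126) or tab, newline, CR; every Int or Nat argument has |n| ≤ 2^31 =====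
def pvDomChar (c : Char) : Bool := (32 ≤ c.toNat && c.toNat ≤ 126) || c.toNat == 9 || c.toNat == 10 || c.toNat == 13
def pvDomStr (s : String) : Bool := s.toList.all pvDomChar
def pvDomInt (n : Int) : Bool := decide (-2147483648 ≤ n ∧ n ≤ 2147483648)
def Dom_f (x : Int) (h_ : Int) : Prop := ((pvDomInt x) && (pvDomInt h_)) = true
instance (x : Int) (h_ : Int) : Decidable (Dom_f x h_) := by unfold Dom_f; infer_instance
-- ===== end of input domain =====

-- B replaces A's triple recursion chained with short-circuiting `or` by an iterative
-- explicit-stack depth-first search with a found flag (objective: alternative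
-- decomposition, same traversal cost).

-- ===== PORT A =====
-- literal transliteration of A's recursion; Python's `a or b` on ints (first operand if
-- truthy, else the second, the second not evaluated otherwise) is transliterated by the
-- nested lets/ifs below.  The recursion on h_ is realised by the fuel (3 - h_).toNat,
-- which is exact whenever the Python recursion terminates (h_ ≤ 3); the fuel-0 fallback 0
-- is only reached for h_ > 3, where the Python recurses forever (excluded by Pre_f).
def fAux : Nat → Int → Int → Int
  | n, x, h_ =>
    if h_ = 3 ∧ x ≥ 82 then 1
    else if h_ = 3 ∧ x < 82 then 0
    else if h_ < 3 ∧ x ≥ 82 then 0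
    else
      match n with
      | 0 => 0
      | n + 1 =>
        if h_ % 2 = 0 then
          let t1 := fAux n (x + 2) (h_ + 1)
          if t1 ≠ 0 then t1 else
            let t2 := fAux n (x + 4) (h_ + 1)
            if t2 ≠ 0 then t2 else fAux n (x * 3) (h_ + 1)
        else
          let t1 := fAux n (x + 2) (h_ + 1)
          if t1 ≠ 0 then t1 else
            let t2 := fAux n (x + 4) (h_ + 1)
            if t2 ≠ 0 then t2 else fAux n (x * 3) (h_ + 1)

def f (x : Int) (h_ : Int) : Int := fAux (3 - h_).toNat x h_

-- ===== PORT B =====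
-- number of nodes of the full ternary tree of the given depth: an upper bound on the
-- number of iterations Source B's while loop performs, used only as fuel below
def treeSz : Nat → Nat
  | 0 => 1
  | n + 1 => 1 + 3 * treeSz n

-- depth bound of the search from value x when all states stay ≥ 1: x grows by ≥ 2 per
-- step until it reaches 82 and is pruned
def depB (x : Int) : Nat := (83 - x).toNat / 2

-- depth bound of Source B's search from state (x, h): remaining levels until h = 3, and for
-- positive x also the climb until x ≥ 82; the `min … 903` cap only keeps the fuel term
-- cheap to evaluate for inputs outside Pre_f (inside Pre_f 3 - h_ ≤ 903, so it is inactive)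
def mB (x : Int) (h_ : Int) : Nat :=
  if 1 ≤ x then min (3 - h_).toNat (depB x) else min (3 - h_).toNat 903

-- the while loop of Source B; the stack's top (Python's list end, where append/pop act) is
-- the head of the Lean list, so the push order x*3, x+4, x+2 becomes the conses below.
-- The fuel only realises termination: it never runs out on inputs satisfying Pre_f.
def loopB : Nat → List (Int × Int) → Bool → Bool
  | 0, _, found => found
  | fuel + 1, stack, found =>
    if found then found
    else
      match stack with
      | [] => found
      | (x1, h1) :: rest =>
        if h1 = 3 then loopB fuel rest (if x1 ≥ 82 then true else found)
        else if x1 ≥ 82 then loopB fuel rest found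
        else loopB fuel ((x1 + 2, h1 + 1) :: (x1 + 4, h1 + 1) :: (x1 * 3, h1 + 1) :: rest) found

def f_alt (x : Int) (h_ : Int) : Int :=
  if loopB (treeSz (mB x h_)) [(x, h_)] false then 1 else 0

-- ===== PRECONDITION & SPEC =====
-- Pre_f excludes h_ > 3, where A recurses with no base case and raises RecursionError,
-- and h_ < -900 with x ≤ 0, where the x*3 branch keeps the state nonpositive so A either
-- exceeds Python's recursion limit (depth 3 - h_, RecursionError) or never prunes and
-- never finishes its exponential call tree; everywhere A returns a value Pre_f admits it.
def Pre_f (x : Int) (h_ : Int) : Prop := h_ ≤ 3 ∧ (-900 ≤ h_ ∨ 1 ≤ x)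
instance (x : Int) (h_ : Int) : Decidable (Pre_f x h_) := by unfold Pre_f; infer_instance
def pvWitness_f : Int × Int := (10, 0)

def Spec_f (x : Int) (h_ : Int) (out : Int) : Prop := out = f_alt x h_
instance (x : Int) (h_ : Int) (out : Int) : Decidable (Spec_f x h_ out) := by unfold Spec_f; infer_instance

-- ===== CLAIM (what is proved, stated in full; the proofs are below) =====
def Claim_equal_f : Prop := ∀ (x : Int) (h_ : Int), Dom_f x h_ → Pre_f x h_ → Spec_f x h_ (f x h_)

-- ===== LEMMAS AND PROOFS =====

lemma fAux01 (n : Nat) (x h_ : Int) : fAux n x h_ = 0 ∨ fAux n x h_ = 1 := by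
  induction n generalizing x h_ with
  | zero =>
    rw [fAux.eq_def]; dsimp only
    split
    · right; rfl
    split
    · left; rfl
    split
    · left; rfl
    left; rfl
  | succ n ih =>
    rw [fAux.eq_def]; dsimp only
    split
    · right; rfl
    split
    · left; rfl
    split
    · left; rfl
    have i1 := ih (x + 2) (h_ + 1)
    have i2 := ih (x + 4) (h_ + 1)
    have i3 := ih (x * 3) (h_ + 1)
    rcases i1 with e1 | e1 <;> rcases i2 with e2 | e2 <;> rcases i3 with e3 | e3 <;>
      split <;> simp [e1, e2, e3]

lemma fAux_base (n : Nat) (x : Int) : fAux n x 3 = if x ≥ 82 then 1 else 0 := by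
  rw [fAux.eq_def]; dsimp only
  by_cases hx : x ≥ 82
  · simp [hx]
  · have hx' : x < 82 := by omega
    simp [hx, hx']

lemma fAux_prune (n : Nat) (x h_ : Int) (hlt : h_ < 3) (hx : x ≥ 82) :
    fAux n x h_ = 0 := by
  rw [fAux.eq_def]; dsimp only
  have hne : ¬ h_ = 3 := by omega
  rw [if_neg (fun h => hne h.1), if_neg (fun h => hne h.1), if_pos ⟨hlt, hx⟩]

lemma fAux_step (n : Nat) (x h_ : Int) (hlt : h_ < 3) (hx : x < 82) :
    fAux (n + 1) x h_ =
      (if (fAux n (x + 2) (h_ + 1) = 1 ∨ fAux n (x + 4) (h_ + 1) = 1 ∨ fAux n (x * 3) (h_ + 1) = 1)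
        then 1 else 0) := by
  rw [fAux.eq_def]; dsimp only
  have hne : ¬ h_ = 3 := by omega
  rw [if_neg (fun h => hne h.1), if_neg (fun h => hne h.1), if_neg (fun h => absurd h.2 (by omega))]
  rcases fAux01 n (x + 2) (h_ + 1) with e1 | e1 <;>
  rcases fAux01 n (x + 4) (h_ + 1) with e2 | e2 <;>
  rcases fAux01 n (x * 3) (h_ + 1) with e3 | e3 <;>
    split <;> simp [e1, e2, e3]

lemma treeSz_pos (n : Nat) : 1 ≤ treeSz n := by
  cases n <;> simp [treeSz]

lemma treeSz_mono {a b : Nat} (h : a ≤ b) : treeSz a ≤ treeSz b := by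
  induction b with
  | zero => interval_cases a; rfl
  | succ b ih =>
    rcases Nat.lt_or_ge a (b + 1) with hl | hl
    · have := ih (by omega)
      have := treeSz_pos a
      simp only [treeSz]
      omega
    · have : a = b + 1 := by omega
      rw [this]

-- the loop invariant on stack entries: h-component ≤ 3, and either the x-component is
-- positive (so the depB bound applies) or the remaining depth is within the 903 cap
def invB (p : Int × Int) : Prop := p.2 ≤ 3 ∧ (1 ≤ p.1 ∨ (3 - p.2).toNat ≤ 903)

lemma mB_three (x : Int) : mB x 3 = 0 := by
  unfold mB; split_ifs <;> simp

lemma invB_child (x1 h1 x' : Int) (hh : h1 < 3) (hinv : invB (x1, h1))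
    (hch : x' = x1 + 2 ∨ x' = x1 + 4 ∨ x' = x1 * 3) : invB (x', h1 + 1) := by
  obtain ⟨-, h2⟩ := hinv
  constructor
  · simp; omega
  · simp only at h2 ⊢
    rcases hch with rfl | rfl | rfl <;> omega

lemma mB_child (x1 h1 x' : Int) (hh : h1 < 3) (hx82 : x1 < 82)
    (hinv : 1 ≤ x1 ∨ (3 - h1).toNat ≤ 903)
    (hch : x' = x1 + 2 ∨ x' = x1 + 4 ∨ x' = x1 * 3) :
    mB x' (h1 + 1) + 1 ≤ mB x1 h1 := by
  unfold mB depB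
  rcases hch with rfl | rfl | rfl <;> split_ifs <;> omega

lemma loopB_spec (fuel : Nat) :
    ∀ (stack : List (Int × Int)) (found : Bool),
    (∀ p ∈ stack, invB p) →
    (stack.map (fun p => treeSz (mB p.1 p.2))).sum ≤ fuel →
    loopB fuel stack found =
      (found || stack.any (fun p => fAux (3 - p.2).toNat p.1 p.2 == 1)) := by
  induction fuel with
  | zero =>
    intro stack found hinv hsum
    cases stack with
    | nil => simp [loopB]
    | cons p rest =>
      exfalso
      have := treeSz_pos (mB p.1 p.2)
      simp [List.map_cons, List.sum_cons] at hsum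
      omega
  | succ fuel ih =>
    intro stack found hinv hsum
    rw [loopB.eq_def]; dsimp only
    by_cases hf : found = true
    · simp [hf]
    have hfF : found = false := by cases found <;> simp_all
    rw [if_neg hf]
    cases stack with
    | nil => simp
    | cons p rest =>
      obtain ⟨x1, h1⟩ := p
      dsimp only
      have hp := hinv (x1, h1) (List.mem_cons_self)
      have hh1 : h1 ≤ 3 := hp.1
      have hrest : ∀ p ∈ rest, invB p := fun p hp => hinv p (List.mem_cons_of_mem _ hp)
      simp only [List.map_cons, List.sum_cons] at hsum
      by_cases h3 : h1 = 3
      · subst h3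
        have hsz : treeSz (mB x1 3) = 1 := by rw [mB_three]; rfl
        rw [hsz] at hsum
        rw [if_pos rfl, ih rest _ hrest (by omega)]
        rw [hfF]
        simp only [List.any_cons]
        rw [fAux_base]
        by_cases hx : x1 ≥ 82 <;> simp [hx]
      · have hlt : h1 < 3 := by omega
        rw [if_neg h3]
        by_cases hx : x1 ≥ 82
        · have := treeSz_pos (mB x1 h1)
          rw [if_pos hx, ih rest _ hrest (by omega)]
          simp only [List.any_cons]
          rw [fAux_prune _ _ _ hlt hx]
          simp
        · rw [if_neg hx]
          obtain ⟨m, hm⟩ : ∃ m, mB x1 h1 = m + 1 :=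
            ⟨mB x1 h1 - 1,
             by have := mB_child x1 h1 (x1 + 2) hlt (by omega) hp.2 (Or.inl rfl); omega⟩
          have hc1 := mB_child x1 h1 (x1 + 2) hlt (by omega) hp.2 (Or.inl rfl)
          have hc2 := mB_child x1 h1 (x1 + 4) hlt (by omega) hp.2 (Or.inr (Or.inl rfl))
          have hc3 := mB_child x1 h1 (x1 * 3) hlt (by omega) hp.2 (Or.inr (Or.inr rfl))
          have hts : treeSz (mB x1 h1) = 1 + 3 * treeSz m := by rw [hm]; rfl
          have ht1 : treeSz (mB (x1 + 2) (h1 + 1)) ≤ treeSz m := treeSz_mono (by omega)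
          have ht2 : treeSz (mB (x1 + 4) (h1 + 1)) ≤ treeSz m := treeSz_mono (by omega)
          have ht3 : treeSz (mB (x1 * 3) (h1 + 1)) ≤ treeSz m := treeSz_mono (by omega)
          have hinv' : ∀ p ∈ ((x1 + 2, h1 + 1) :: (x1 + 4, h1 + 1) :: (x1 * 3, h1 + 1) :: rest),
              invB p := by
            intro p hp'
            simp only [List.mem_cons] at hp'
            rcases hp' with h | h | h | h
            · rw [h]; exact invB_child x1 h1 _ hlt hp (Or.inl rfl)
            · rw [h]; exact invB_child x1 h1 _ hlt hp (Or.inr (Or.inl rfl))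
            · rw [h]; exact invB_child x1 h1 _ hlt hp (Or.inr (Or.inr rfl))
            · exact hrest p h
          have hsum' : (((x1 + 2, h1 + 1) :: (x1 + 4, h1 + 1) :: (x1 * 3, h1 + 1) :: rest).map
              (fun p => treeSz (mB p.1 p.2))).sum ≤ fuel := by
            simp only [List.map_cons, List.sum_cons]
            omega
          rw [ih _ _ hinv' hsum']
          simp only [List.any_cons]
          obtain ⟨n', hn'⟩ : ∃ n', (3 - h1).toNat = n' + 1 := ⟨(3 - (h1 + 1)).toNat, by omega⟩
          have hn'' : (3 - (h1 + 1)).toNat = n' := by omega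
          rw [hn', fAux_step _ _ _ hlt (by omega)]
          simp only [hn'']
          rcases fAux01 n' (x1 + 2) (h1 + 1) with e1 | e1 <;>
          rcases fAux01 n' (x1 + 4) (h1 + 1) with e2 | e2 <;>
          rcases fAux01 n' (x1 * 3) (h1 + 1) with e3 | e3 <;>
            simp [e1, e2, e3]

-- ===== VERDICT (by name: the statement is the Claim_ definition above) =====
theorem f_spec : Claim_equal_f := by
  intro x h_ _ hpre
  obtain ⟨hhi, hlo⟩ := hpre
  unfold Spec_f f_alt f
  rw [loopB_spec _ [(x, h_)] false
        (by intro p hp; simp at hp; rw [hp]; exact ⟨hhi, by rcases hlo with h | h <;> omega⟩)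
        (by simp)]
  simp only [List.any_cons, List.any_nil, Bool.false_or, Bool.or_false]
  rcases fAux01 (3 - h_).toNat x h_ with e | e <;> simp [e]
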